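-- pv_equiv track=rewrite | github.com/achchala/search-engine | query_biased_summary.py | sentence_score
-- ===== SOURCE A (Python) =====
-- def sentence_score(sentence_tokens, query_tokens):
--     run = 0
--     max_run = 0
--     unique_words = set()
--     total_count = 0
--     i = 0
--
--     while i < len(sentence_tokens):
--         if sentence_tokens[i] in query_tokens:
--             total_count += 1
--             unique_words.add(sentence_tokens[i])
--             run += 1
--             i += 1
--             while i < len(sentence_tokens) and sentence_tokens[i] in query_tokens:
--                 run += 1
--                 total_count += 1
--                 unique_words.add(sentence_tokens[i])
--                 i += 1
--             max_run = max(run, max_run)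
--             run = 0
--         else:
--             i += 1
--
--     distinct_count = len(unique_words)
--     score = 1 + total_count + distinct_count + max_run
--     return score
-- ===== SOURCE B (Python) =====
-- def sentence_score(sentence_tokens, query_tokens):
--     flags = [t in query_tokens for t in sentence_tokens]
--     total_count = sum(flags)
--     distinct_count = len({t for t in sentence_tokens if t in query_tokens})
--     max_run = cur = 0
--     for f in flags:
--         cur = cur + 1 if f else 0
--         max_run = max(max_run, cur)
--     return 1 + total_count + distinct_count + max_run
-- ===== Notes on version B (the rewrite author's own statement) =====
-- stated objective: simpler
-- what changed: Replaces A's index-based nested while loops (inner loop consuming a run while interleaving total/set/run bookkeeping) with three independent passes: a membership-flag list summed for total, a set comprehension for distinct, and a single fold for max run.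
import Mathlib
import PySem

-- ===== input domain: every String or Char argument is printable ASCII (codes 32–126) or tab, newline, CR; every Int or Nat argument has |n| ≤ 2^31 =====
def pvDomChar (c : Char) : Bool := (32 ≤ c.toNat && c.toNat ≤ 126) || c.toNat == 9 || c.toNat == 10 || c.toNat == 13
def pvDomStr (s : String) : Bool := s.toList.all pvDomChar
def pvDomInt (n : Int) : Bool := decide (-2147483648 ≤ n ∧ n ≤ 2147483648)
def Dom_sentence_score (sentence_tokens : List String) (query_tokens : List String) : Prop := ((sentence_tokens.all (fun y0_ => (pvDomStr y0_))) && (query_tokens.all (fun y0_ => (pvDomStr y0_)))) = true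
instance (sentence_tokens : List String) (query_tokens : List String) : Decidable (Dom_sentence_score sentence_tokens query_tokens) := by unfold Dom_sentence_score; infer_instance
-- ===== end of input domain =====

-- B replaces A's interleaved nested-while scan by three independent passes (flag sum, set
-- comprehension, one fold for the max run); same results, simpler decomposition, no speed claim.

-- ===== PORT A =====
-- inner while: consume the matching run starting at the current position
def pvAInner (qt : List String) : List String → Int → Int → PySem.Set String → List String × Int × Int × PySem.Set String
  | [], run, total, uniq => ([], run, total, uniq)
  | x :: rest, run, total, uniq =>
    if qt.contains x then pvAInner qt rest (run + 1) (total + 1) (PySem.Set.add uniq x)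
    else (x :: rest, run, total, uniq)

theorem pvAInner_len (qt : List String) : ∀ (l : List String) (run total : Int) (uniq : PySem.Set String),
    (pvAInner qt l run total uniq).1.length ≤ l.length := by
  intro l
  induction l with
  | nil => intro _ _ _; simp [pvAInner]
  | cons x rest ih =>
    intro run total uniq
    simp only [pvAInner]
    split
    · exact Nat.le_succ_of_le (ih _ _ _)
    · simp

-- outer while over the remaining tokens, state (run, max_run, total, unique_words)
def pvAOuter (qt : List String) : List String → Int → Int → Int → PySem.Set String → Int × Int × PySem.Set String
  | [], _run, maxRun, total, uniq => (maxRun, total, uniq)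
  | x :: rest, run, maxRun, total, uniq =>
    if qt.contains x then
      let r := pvAInner qt rest (run + 1) (total + 1) (PySem.Set.add uniq x)
      pvAOuter qt r.1 0 (max r.2.1 maxRun) r.2.2.1 r.2.2.2
    else pvAOuter qt rest run maxRun total uniq
termination_by l => l.length
decreasing_by
  · exact Nat.lt_succ_of_le (pvAInner_len qt rest _ _ _)
  · simp

def sentence_score (sentence_tokens : List String) (query_tokens : List String) : Int :=
  let r := pvAOuter query_tokens sentence_tokens 0 0 0 PySem.Set.empty
  1 + r.2.1 + (PySem.Set.len r.2.2 : Int) + r.1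

-- ===== PORT B =====
-- loop body of B's max-run pass: cur = cur + 1 if f else 0; max_run = max(max_run, cur)
def pvStep (p : Int × Int) (f : Bool) : Int × Int :=
  let cur := if f then p.1 + 1 else 0
  (cur, max p.2 cur)

def sentence_score_alt (sentence_tokens : List String) (query_tokens : List String) : Int :=
  let flags := sentence_tokens.map (fun t => query_tokens.contains t)
  let total : Int := flags.foldl (fun a f => a + (if f then 1 else 0)) 0
  let distinct : Int :=
    (PySem.Set.len (PySem.Set.ofList (sentence_tokens.filter (fun t => query_tokens.contains t))) : Int)
  let mr := flags.foldl pvStep (0, 0)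
  1 + total + distinct + mr.2

-- ===== PRECONDITION & SPEC =====
def Spec_sentence_score (sentence_tokens : List String) (query_tokens : List String) (out : Int) : Prop := out = sentence_score_alt sentence_tokens query_tokens
instance (sentence_tokens : List String) (query_tokens : List String) (out : Int) : Decidable (Spec_sentence_score sentence_tokens query_tokens out) := by unfold Spec_sentence_score; infer_instance

-- ===== CLAIM (what is proved, stated in full; the proofs are below) =====
def Claim_equal_sentence_score : Prop := ∀ (sentence_tokens : List String) (query_tokens : List String), Dom_sentence_score sentence_tokens query_tokens → Spec_sentence_score sentence_tokens query_tokens (sentence_score sentence_tokens query_tokens)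

-- ===== LEMMAS AND PROOFS =====

theorem pvAInner_eq (qt : List String) : ∀ (l : List String) (run total : Int) (uniq : PySem.Set String),
    pvAInner qt l run total uniq =
      (l.dropWhile (fun t => qt.contains t),
       run + ((l.takeWhile (fun t => qt.contains t)).length : Int),
       total + ((l.takeWhile (fun t => qt.contains t)).length : Int),
       (l.takeWhile (fun t => qt.contains t)).foldl PySem.Set.add uniq) := by
  intro l
  induction l with
  | nil => intro _ _ _; simp [pvAInner]
  | cons x rest ih =>
    intro run total uniq
    by_cases h : x ∈ qt
    · simp only [pvAInner, List.contains_eq_mem, h, decide_true, if_true, ih,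
        List.dropWhile_cons, List.takeWhile_cons, List.length_cons, List.foldl_cons]
      simp only [Prod.mk.injEq, true_and, and_true]
      constructor <;> (push_cast; ring)
    · simp [pvAInner, h]

theorem pvStep_replicate : ∀ (k : Nat) (c b : Int), 0 ≤ c →
    (List.replicate (k + 1) true).foldl pvStep (c, b) = (c + (k + 1), max b (c + (k + 1))) := by
  intro k
  induction k with
  | zero => intro c b _; simp [pvStep]
  | succ k ih =>
    intro c b hc
    rw [List.replicate_succ, List.foldl_cons]
    show (List.replicate (k + 1) true).foldl pvStep (c + 1, max b (c + 1)) = _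
    rw [ih (c + 1) (max b (c + 1)) (by omega), max_assoc]
    have hmx : max (c + 1) (c + 1 + ((k : Int) + 1)) = c + 1 + ((k : Int) + 1) :=
      max_eq_right (by omega)
    rw [hmx]
    simp only [Prod.mk.injEq]
    constructor
    · push_cast; ring
    · congr 1; push_cast; ring

theorem pvStep_reset (bs : List Bool) (c c' m : Int) (hm : 0 ≤ m)
    (h : bs = [] ∨ bs.head? = some false) :
    (bs.foldl pvStep (c, m)).2 = (bs.foldl pvStep (c', m)).2 := by
  rcases h with h | h
  · subst h; rfl
  · cases bs with
    | nil => simp at h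
    | cons b t =>
      simp only [List.head?_cons, Option.some.injEq] at h
      subst h
      simp [pvStep, max_eq_left hm]

theorem pvMapTakeWhile (p : String → Bool) (l : List String) :
    (l.takeWhile p).map p = List.replicate (l.takeWhile p).length true := by
  refine List.eq_replicate_iff.mpr ⟨by simp, ?_⟩
  intro b hb
  obtain ⟨a, ha, rfl⟩ := List.mem_map.mp hb
  exact List.mem_takeWhile_imp ha

theorem pvMapDropWhile_head (p : String → Bool) (l : List String) :
    (l.dropWhile p).map p = [] ∨ ((l.dropWhile p).map p).head? = some false := by
  induction l with
  | nil => left; rfl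
  | cons x t ih =>
    rw [List.dropWhile_cons]
    by_cases h : p x
    · simpa [h] using ih
    · right; simp [h]

theorem pvAOuter_eq (qt : List String) : ∀ (l : List String) (b total : Int) (uniq : PySem.Set String), 0 ≤ b →
    pvAOuter qt l 0 b total uniq =
      (((l.map (fun t => qt.contains t)).foldl pvStep (0, b)).2,
       total + ((l.countP (fun t => qt.contains t)) : Int),
       (l.filter (fun t => qt.contains t)).foldl PySem.Set.add uniq) := by
  have main : ∀ (n : Nat) (l : List String), l.length ≤ n → ∀ (b total : Int) (uniq : PySem.Set String), 0 ≤ b →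
      pvAOuter qt l 0 b total uniq =
        (((l.map (fun t => qt.contains t)).foldl pvStep (0, b)).2,
         total + ((l.countP (fun t => qt.contains t)) : Int),
         (l.filter (fun t => qt.contains t)).foldl PySem.Set.add uniq) := by
    intro n
    induction n with
    | zero =>
      intro l hl b total uniq hb
      have hnil : l = [] := List.eq_nil_of_length_eq_zero (Nat.le_zero.mp hl)
      subst hnil
      simp [pvAOuter]
    | succ n ih =>
      intro l hl b total uniq hb
      match l with
      | [] => simp [pvAOuter]
      | x :: rest =>
        simp only [List.length_cons, Nat.add_le_add_iff_right] at hl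
        by_cases h : qt.contains x = true
        · rw [pvAOuter]
          simp only [h, if_true]
          rw [pvAInner_eq]
          have hdw : (rest.dropWhile (fun t => qt.contains t)).length ≤ n :=
            le_trans (List.length_dropWhile_le _ _) hl
          rw [ih _ hdw _ _ _ (le_max_of_le_left (by positivity))]
          have hsplit := List.takeWhile_append_dropWhile (p := fun t => qt.contains t) (l := rest)
          dsimp only
          set tw := List.takeWhile (fun t => qt.contains t) rest with htw
          set dw := List.dropWhile (fun t => qt.contains t) rest with hdwd
          have hktw : List.countP (fun t => qt.contains t) tw = tw.length :=
            List.countP_eq_length.mpr (fun a ha => List.mem_takeWhile_imp ha)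
          have hftw : List.filter (fun t => qt.contains t) tw = tw :=
            List.filter_eq_self.mpr (fun a ha => List.mem_takeWhile_imp ha)
          have hmtw : tw.map (fun t => qt.contains t) = List.replicate tw.length true :=
            htw ▸ pvMapTakeWhile (fun t => qt.contains t) rest
          have hhead : dw.map (fun t => qt.contains t) = [] ∨
              (dw.map (fun t => qt.contains t)).head? = some false :=
            hdwd ▸ pvMapDropWhile_head (fun t => qt.contains t) rest
          simp only [Prod.mk.injEq]
          refine ⟨?_, ?_, ?_⟩
          · rw [List.map_cons, ← hsplit, List.map_append, hmtw, h, ← List.cons_append,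
              ← List.replicate_succ, List.foldl_append,
              pvStep_replicate tw.length 0 b le_rfl]
            have hm : max (0 + 1 + (tw.length : Int)) b = max b (0 + ((tw.length : Int) + 1)) := by
              rw [max_comm]; ring_nf
            rw [hm]
            exact pvStep_reset _ 0 (0 + ((tw.length : Int) + 1)) _
              (le_max_of_le_right (by positivity)) hhead
          · rw [← hsplit, List.countP_cons, List.countP_append, hktw]
            simp only [h, if_true]
            push_cast
            ring
          · rw [← hsplit, List.filter_cons]
            simp only [h, if_true, List.filter_append, hftw, List.foldl_cons, List.foldl_append]
        · rw [pvAOuter]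
          simp only [h, Bool.false_eq_true, if_false]
          rw [ih rest hl b total uniq hb]
          simp only [List.map_cons, List.foldl_cons, List.countP_cons, h, List.filter_cons, pvStep,
            Bool.false_eq_true, if_false, max_eq_left hb]
          simp
  intro l b total uniq hb
  exact main l.length l le_rfl b total uniq hb

theorem pvSum_flags (qt : List String) : ∀ (l : List String) (a : Int),
    (l.map (fun t => qt.contains t)).foldl (fun a f => a + (if f then 1 else 0)) a
      = a + ((l.countP (fun t => qt.contains t)) : Int) := by
  intro l
  induction l with
  | nil => intro a; simp
  | cons x rest ih =>
    intro a
    by_cases h : qt.contains x <;>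
      · simp only [List.map_cons, List.foldl_cons, h, if_true, if_false, ih, List.countP_cons,
          Bool.false_eq_true]
        push_cast
        simp
        try ring

-- ===== VERDICT (by name: the statement is the Claim_ definition above) =====
theorem sentence_score_spec : Claim_equal_sentence_score := by
  intro st qt _
  unfold Spec_sentence_score sentence_score sentence_score_alt
  simp only [PySem.Set.empty, pvAOuter_eq qt st 0 0 [] le_rfl, pvSum_flags,
    PySem.Set.ofList_eq_foldl, PySem.Set.empty]
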